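-- pv_equiv track=rewrite | github.com/ACCtools/SKYPE | 02_Build_Breakend_Graph_Limited.py | max_overlap
-- ===== SOURCE A (Python) =====
-- def max_overlap(intervals, target_intervals):
--     events = []
--     temp_inf = 2 * len(intervals) if target_intervals else 0
--
--     for l in target_intervals:
--         st, nd = l[1], l[2]
--         events.append((st, +temp_inf))
--         events.append((nd, -temp_inf))
--
--     for l in intervals:
--         st, nd = l[1], l[2]
--         events.append((st, +1))
--         events.append((nd, -1))
--
--     events.sort(key=lambda x: (x[0], x[1]))
--
--     curr = max_cnt = 0
--     for _, delta in events:
--         curr += delta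
--         max_cnt = max(max_cnt, curr)
--
--     return max_cnt - temp_inf
-- ===== SOURCE B (Python) =====
-- def max_overlap(intervals, target_intervals):
--     temp_inf = 2 * len(intervals) if target_intervals else 0
--
--     def coverage(p):
--         c = 0
--         for l in target_intervals:
--             c += temp_inf * ((l[1] <= p) - (l[2] <= p))
--         for l in intervals:
--             c += (l[1] <= p) - (l[2] <= p)
--         return c
--
--     best = 0
--     for l in target_intervals + intervals:
--         best = max(best, coverage(l[1]))
--     return best - temp_inf
-- ===== Notes on version B (the rewrite author's own statement) =====
-- stated objective: alternative
-- what changed: B abandons the sweep line entirely: no event list, no dict and no sort; it brute-force evaluates the signed weighted coverage at each candidate stabbing point (every start coordinate) by scanning all intervals, taking the max of those stabbing counts (and 0), which is correct because the sweep's running maximum is always attained just after processing a start coordinate.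
import Mathlib
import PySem

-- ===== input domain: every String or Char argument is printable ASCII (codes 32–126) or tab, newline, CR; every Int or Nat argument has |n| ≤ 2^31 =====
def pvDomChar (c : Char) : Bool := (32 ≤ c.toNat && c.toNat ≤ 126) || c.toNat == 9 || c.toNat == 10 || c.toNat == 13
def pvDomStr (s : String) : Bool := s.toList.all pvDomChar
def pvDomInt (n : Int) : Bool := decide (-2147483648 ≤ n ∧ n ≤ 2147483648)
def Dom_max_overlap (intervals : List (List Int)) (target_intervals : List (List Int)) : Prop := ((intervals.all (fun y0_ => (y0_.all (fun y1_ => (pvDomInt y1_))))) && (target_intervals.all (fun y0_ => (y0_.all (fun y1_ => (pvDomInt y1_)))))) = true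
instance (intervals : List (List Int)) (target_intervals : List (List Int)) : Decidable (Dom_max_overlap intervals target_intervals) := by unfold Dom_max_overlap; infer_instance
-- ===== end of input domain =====

-- B replaces A's sort-and-sweep over ±weight events by a brute-force stabbing count:
-- it evaluates the signed weighted coverage at every start coordinate and takes the max
-- (objective: alternative; no sort, no event list, O(n^2) instead of O(n log n)).


-- ===== PORT A =====
-- literal port of A: build the (position, delta) event list, sort by the tuple key
-- (position, delta), sweep with a running count and a running max.
-- l[1]/l[2] are ported as pyGetD with default 0: inside Pre_ every row has length ≥ 3,
-- so the default is never used (Python raises IndexError outside Pre_).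
def max_overlap (intervals : List (List Int)) (target_intervals : List (List Int)) : Int :=
  let temp_inf : Int := if target_intervals ≠ [] then 2 * (intervals.length : Int) else 0
  let events : List (Int × Int) :=
    target_intervals.foldl (fun acc l =>
      acc ++ [(PySem.List.pyGetD l 1 0, temp_inf)] ++ [(PySem.List.pyGetD l 2 0, -temp_inf)]) []
  let events : List (Int × Int) :=
    intervals.foldl (fun acc l =>
      acc ++ [(PySem.List.pyGetD l 1 0, 1)] ++ [(PySem.List.pyGetD l 2 0, -1)]) events
  let sortedE := PySem.List.sorted2 events (fun e => e.1) (fun e => e.2)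
  let r := sortedE.foldl (fun s e => (s.1 + e.2, max s.2 (s.1 + e.2))) ((0, 0) : Int × Int)
  r.2 - temp_inf

-- ===== PORT B =====
-- literal port of B (Source B): no events and no sorting; coverage(p) scans both lists and
-- sums the signed stabbing contribution of each interval at p ((st ≤ p) - (nd ≤ p),
-- weighted); best is the max of coverage over all start coordinates and 0.
def max_overlap_alt (intervals : List (List Int)) (target_intervals : List (List Int)) : Int :=
  let temp_inf : Int := if target_intervals ≠ [] then 2 * (intervals.length : Int) else 0
  let coverage : Int → Int := fun p =>
    let c : Int := target_intervals.foldl (fun c l =>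
      c + temp_inf * ((if PySem.List.pyGetD l 1 0 ≤ p then (1 : Int) else 0)
                      - (if PySem.List.pyGetD l 2 0 ≤ p then (1 : Int) else 0))) 0
    intervals.foldl (fun c l =>
      c + ((if PySem.List.pyGetD l 1 0 ≤ p then (1 : Int) else 0)
           - (if PySem.List.pyGetD l 2 0 ≤ p then (1 : Int) else 0))) c
  let best := (target_intervals ++ intervals).foldl
      (fun b l => max b (coverage (PySem.List.pyGetD l 1 0))) 0
  best - temp_inf

-- ===== PRECONDITION & SPEC =====
-- Pre_ excludes exactly the inputs where Python A raises IndexError: a row of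
-- intervals or target_intervals shorter than 3 elements (A reads l[1] and l[2]).
def Pre_max_overlap (intervals : List (List Int)) (target_intervals : List (List Int)) : Prop :=
  (∀ l ∈ intervals, 3 ≤ l.length) ∧ (∀ l ∈ target_intervals, 3 ≤ l.length)
instance (intervals : List (List Int)) (target_intervals : List (List Int)) : Decidable (Pre_max_overlap intervals target_intervals) := by unfold Pre_max_overlap; infer_instance
def pvWitness_max_overlap : List (List Int) × List (List Int) := ([[0, 1, 5], [0, 2, 7]], [[0, 0, 10]])

def Spec_max_overlap (intervals : List (List Int)) (target_intervals : List (List Int)) (out : Int) : Prop := out = max_overlap_alt intervals target_intervals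
instance (intervals : List (List Int)) (target_intervals : List (List Int)) (out : Int) : Decidable (Spec_max_overlap intervals target_intervals out) := by unfold Spec_max_overlap; infer_instance

-- ===== CLAIM (what is proved, stated in full; the proofs are below) =====
def Claim_equal_max_overlap : Prop := ∀ (intervals : List (List Int)) (target_intervals : List (List Int)), Dom_max_overlap intervals target_intervals → Pre_max_overlap intervals target_intervals → Spec_max_overlap intervals target_intervals (max_overlap intervals target_intervals)

-- ===== LEMMAS AND PROOFS =====

-- lexicographic ≤ on events, the order A's tuple-key sort produces
def pvLexLe (a b : Int × Int) : Prop := a.1 < b.1 ∨ (a.1 = b.1 ∧ a.2 ≤ b.2)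

-- net signed weight of coordinate c in an event list
def pvNetAt (c : Int) (es : List (Int × Int)) : Int :=
  ((es.filter (fun e => e.1 == c)).map (fun e => e.2)).sum

-- total signed weight of all events at coordinates ≤ c ("coverage at stabbing point c")
def pvF (c : Int) (es : List (Int × Int)) : Int :=
  ((es.filter (fun e => decide (e.1 ≤ c))).map (fun e => e.2)).sum

lemma pvLexLe_trans {a b c : Int × Int} (h1 : pvLexLe a b) (h2 : pvLexLe b c) : pvLexLe a c := by
  unfold pvLexLe at *; omega

lemma pv_insertBy_pairwise (x : Int × Int) : ∀ (ys : List (Int × Int)),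
    ys.Pairwise pvLexLe →
    (PySem.List.insertBy
      (fun a b => decide (a.1 < b.1) || (!decide (b.1 < a.1) && decide (a.2 < b.2))) x ys).Pairwise pvLexLe := by
  intro ys
  induction ys with
  | nil => intro _; simp [PySem.List.insertBy]
  | cons y ys ih =>
    intro h
    rw [List.pairwise_cons] at h
    obtain ⟨hy, hys⟩ := h
    by_cases hb : (decide (x.1 < y.1) || (!decide (y.1 < x.1) && decide (x.2 < y.2))) = true
    · simp only [PySem.List.insertBy, hb, if_true]
      refine List.Pairwise.cons ?_ (List.Pairwise.cons hy hys)
      intro z hz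
      have hxy : pvLexLe x y := by
        simp only [Bool.or_eq_true, Bool.and_eq_true, Bool.not_eq_true', decide_eq_true_eq, decide_eq_false_iff_not] at hb
        unfold pvLexLe; omega
      rcases List.mem_cons.1 hz with rfl | hz
      · exact hxy
      · exact pvLexLe_trans hxy (hy z hz)
    · simp only [PySem.List.insertBy, hb]
      refine List.Pairwise.cons ?_ (ih hys)
      intro z hz
      rw [PySem.List.insertBy_mem_iff] at hz
      have hyx : pvLexLe y x := by
        simp only [Bool.or_eq_true, Bool.and_eq_true, Bool.not_eq_true', decide_eq_true_eq, decide_eq_false_iff_not, not_or, not_and] at hb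
        unfold pvLexLe; omega
      rcases hz with rfl | hz
      · exact hyx
      · exact hy z hz

-- A's tuple-key sort yields a lexicographically ordered event list
lemma pv_sorted2_pairwise (es : List (Int × Int)) :
    (PySem.List.sorted2 es (fun e => e.1) (fun e => e.2)).Pairwise pvLexLe := by
  show (es.foldl (fun acc x => PySem.List.insertBy _ x acc) []).Pairwise pvLexLe
  induction es using List.reverseRecOn with
  | nil => simp
  | append_singleton es e ih =>
    rw [List.foldl_append]
    exact pv_insertBy_pairwise _ _ ih

-- sweeping an ascending delta list from a state with curr ≤ max jumps straight to the group total
lemma pv_sweep_sorted_deltas : ∀ (ds : List Int), ds.Pairwise (· ≤ ·) → ∀ (c m : Int), c ≤ m →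
    ds.foldl (fun s d => (s.1 + d, max s.2 (s.1 + d))) ((c, m) : Int × Int)
      = (c + ds.sum, max m (c + ds.sum)) := by
  intro ds
  induction ds with
  | nil => intro _ c m hcm; simp; omega
  | cons d ds ih =>
    intro h c m hcm
    rw [List.pairwise_cons] at h
    obtain ⟨hd, hds⟩ := h
    simp only [List.foldl_cons]
    rw [ih hds (c + d) (max m (c + d)) (le_max_right _ _)]
    have key : c + d ≤ max m (c + d + ds.sum) := by
      by_cases hs : 0 ≤ ds.sum
      · have : c + d ≤ c + d + ds.sum := by omega
        omega
      · have hdneg : d < 0 := by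
          rcases lt_or_ge d 0 with hneg | hge
          · exact hneg
          · have : 0 ≤ ds.sum := List.sum_nonneg (fun x hx => le_trans hge (hd x hx))
            omega
        omega
    simp only [List.sum_cons]
    rw [Prod.ext_iff]
    constructor
    · simp; ring
    · simp only []
      omega

-- in a lex-sorted list whose coordinates are all ≥ c, the events at c form a prefix
lemma pv_group_prefix (c : Int) : ∀ (es : List (Int × Int)), es.Pairwise pvLexLe →
    (∀ e ∈ es, c ≤ e.1) →
    es = es.filter (fun e => e.1 == c) ++ es.filter (fun e => !(e.1 == c)) := by
  intro es
  induction es with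
  | nil => intro _ _; simp
  | cons e t ih =>
    intro hp hge
    rw [List.pairwise_cons] at hp
    obtain ⟨he, ht⟩ := hp
    by_cases hc : e.1 = c
    · have hrec := ih ht (fun x hx => hge x (List.mem_cons_of_mem _ hx))
      simp only [List.filter_cons, hc, beq_self_eq_true, Bool.not_true, if_true]
      norm_num
      conv_lhs => rw [hrec]
    · have hgt : c < e.1 := lt_of_le_of_ne (hge e (List.mem_cons_self)) (Ne.symm hc)
      have hnone : ∀ x ∈ e :: t, ¬ x.1 = c := by
        intro x hx
        rcases List.mem_cons.1 hx with rfl | hx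
        · exact hc
        · have := he x hx
          unfold pvLexLe at this
          omega
      have h1 : (e :: t).filter (fun e => e.1 == c) = [] := by
        rw [List.filter_eq_nil_iff]
        intro x hx; simpa using hnone x hx
      have h2 : (e :: t).filter (fun e => !(e.1 == c)) = e :: t := by
        rw [List.filter_eq_self]
        intro x hx; simpa using hnone x hx
      rw [h1, h2]; simp

lemma pv_netAt_filter_ne (x c0 : Int) (es : List (Int × Int)) (hne : x ≠ c0) :
    pvNetAt x (es.filter (fun e => !(e.1 == c0))) = pvNetAt x es := by
  unfold pvNetAt
  rw [List.filter_filter]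
  congr 1
  apply congrArg
  apply List.filter_congr
  intro a _
  by_cases h : a.1 = x
  · simp [h, hne]
  · simp [h]

-- main grouping lemma: the per-event sweep of a lex-sorted event list equals the
-- per-coordinate sweep over any strictly increasing coordinate list covering it
lemma pv_main : ∀ (cs : List Int), cs.Pairwise (· < ·) →
    ∀ (es : List (Int × Int)), es.Pairwise pvLexLe → (∀ e ∈ es, e.1 ∈ cs) →
    ∀ (c m : Int), c ≤ m →
    es.foldl (fun s e => (s.1 + e.2, max s.2 (s.1 + e.2))) ((c, m) : Int × Int)
      = cs.foldl (fun s x => (s.1 + pvNetAt x es, max s.2 (s.1 + pvNetAt x es))) ((c, m) : Int × Int) := by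
  intro cs
  induction cs with
  | nil =>
    intro _ es hp hmem c m hcm
    have hes : es = [] := by
      cases es with
      | nil => rfl
      | cons e t => exact absurd (hmem e List.mem_cons_self) (by simp)
    subst hes; rfl
  | cons c0 cs ih =>
    intro hcs es hp hmem c m hcm
    rw [List.pairwise_cons] at hcs
    obtain ⟨hc0, hcs⟩ := hcs
    have hge : ∀ e ∈ es, c0 ≤ e.1 := by
      intro e he
      rcases List.mem_cons.1 (hmem e he) with h | h
      · omega
      · exact le_of_lt (hc0 _ h)
    have hsplit := pv_group_prefix c0 es hp hge
    have hec : ∀ e ∈ es.filter (fun e => e.1 == c0), e.1 = c0 := by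
      intro e he
      have := List.of_mem_filter he
      simpa using this
    have hdp : ((es.filter (fun e => e.1 == c0)).map (fun e => e.2)).Pairwise (· ≤ ·) := by
      rw [List.pairwise_map]
      have hpf : (es.filter (fun e => e.1 == c0)).Pairwise pvLexLe := hp.filter _
      refine hpf.imp_of_mem ?_
      intro a b ha hb hab
      have h1 := hec a ha
      have h2 := hec b hb
      unfold pvLexLe at hab
      omega
    conv_lhs => rw [hsplit]
    rw [List.foldl_append]
    have hgroup : (es.filter (fun e => e.1 == c0)).foldl
        (fun s e => (s.1 + e.2, max s.2 (s.1 + e.2))) ((c, m) : Int × Int)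
        = (c + pvNetAt c0 es, max m (c + pvNetAt c0 es)) := by
      have h := pv_sweep_sorted_deltas _ hdp c m hcm
      rw [List.foldl_map] at h
      exact h
    rw [hgroup]
    rw [List.foldl_cons]
    have hih := ih hcs (es.filter (fun e => !(e.1 == c0))) (hp.filter _)
      (by
        intro e he
        have hmem' := hmem e (List.mem_of_mem_filter he)
        have hne : ¬ e.1 = c0 := by
          have := List.of_mem_filter he
          simpa using this
        rcases List.mem_cons.1 hmem' with h | h
        · exact absurd h hne
        · exact h)
      (c + pvNetAt c0 es) (max m (c + pvNetAt c0 es)) (le_max_right _ _)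
    rw [hih]
    apply PySem.List.foldl_congr_mem
    intro acc x hx
    have hne : x ≠ c0 := by
      have := hc0 x hx
      omega
    rw [pv_netAt_filter_ne x c0 es hne]

-- coverage at c equals coverage at q plus the net weight of events in (q, c]
lemma pvF_diff : ∀ (es : List (Int × Int)) (q c : Int), q ≤ c →
    pvF c es = pvF q es
      + ((es.filter (fun e => decide (q < e.1) && decide (e.1 ≤ c))).map (fun e => e.2)).sum := by
  intro es
  induction es with
  | nil => intro q c _; simp [pvF]
  | cons e t ih =>
    intro q c h
    have hiht := ih q c h
    unfold pvF at *
    by_cases h1 : e.1 ≤ q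
    · have h2 : e.1 ≤ c := le_trans h1 h
      have h3 : ¬ q < e.1 := not_lt.2 h1
      simp [List.filter_cons, h1, h2, h3]
      omega
    · by_cases h2 : e.1 ≤ c
      · have h3 : q < e.1 := not_le.1 h1
        simp [List.filter_cons, h1, h2, h3]
        omega
      · simp [List.filter_cons, h1, h2]
        omega

-- peeling the events of coordinate c out of a coverage sum at a point x ≥ c
lemma pvF_split : ∀ (es : List (Int × Int)) (c x : Int), c ≤ x →
    pvF x es = pvNetAt c es + pvF x (es.filter (fun e => !(e.1 == c))) := by
  intro es
  induction es with
  | nil => intro c x _; simp [pvF, pvNetAt]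
  | cons e t ih =>
    intro c x h
    have hiht := ih c x h
    unfold pvF pvNetAt at *
    simp only [List.filter_filter] at hiht ⊢
    by_cases h1 : e.1 = c
    · have h2 : e.1 ≤ x := by omega
      simp [List.filter_cons, h1, h2, h]
      omega
    · by_cases h2 : e.1 ≤ x
      · simp [List.filter_cons, h1, h2, h]
        omega
      · simp [List.filter_cons, h1, h2, h]
        omega

-- the per-coordinate sweep over a strictly increasing covering coordinate list computes
-- the running max of the coverage values pvF
lemma pv_sweep_to_max : ∀ (cs : List Int), cs.Pairwise (· < ·) →
    ∀ (es : List (Int × Int)) (a m : Int), (∀ e ∈ es, e.1 ∈ cs) →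
    (cs.foldl (fun s x => (s.1 + pvNetAt x es, max s.2 (s.1 + pvNetAt x es))) ((a, m) : Int × Int)).2
      = (cs.map (fun x => a + pvF x es)).foldl max m := by
  intro cs
  induction cs with
  | nil => intro _ es a m _; simp
  | cons c cs ih =>
    intro hp es a m hcov
    rw [List.pairwise_cons] at hp
    obtain ⟨hc, hp⟩ := hp
    have hFc : pvF c es = pvNetAt c es := by
      unfold pvF pvNetAt
      congr 1
      apply congrArg
      apply List.filter_congr
      intro e he
      rcases List.mem_cons.1 (hcov e he) with h | h
      · simp [h]
      · have := hc _ h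
        have hne : e.1 ≠ c := by omega
        have hnle : ¬ e.1 ≤ c := by omega
        simp [hne, hnle]
    simp only [List.foldl_cons, List.map_cons]
    have hcong : cs.foldl (fun s x => (s.1 + pvNetAt x es, max s.2 (s.1 + pvNetAt x es)))
          ((a + pvNetAt c es, max m (a + pvNetAt c es)) : Int × Int)
        = cs.foldl (fun s x => (s.1 + pvNetAt x (es.filter (fun e => !(e.1 == c))),
            max s.2 (s.1 + pvNetAt x (es.filter (fun e => !(e.1 == c))))))
          ((a + pvNetAt c es, max m (a + pvNetAt c es)) : Int × Int) := by
      apply PySem.List.foldl_congr_mem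
      intro acc x hx
      have hne : x ≠ c := by have := hc x hx; omega
      rw [pv_netAt_filter_ne x c es hne]
    rw [hcong]
    rw [ih hp (es.filter (fun e => !(e.1 == c))) (a + pvNetAt c es) (max m (a + pvNetAt c es))
      (by
        intro e he
        have hmem' := hcov e (List.mem_of_mem_filter he)
        have hne : ¬ e.1 = c := by
          have := List.of_mem_filter he
          simpa using this
        rcases List.mem_cons.1 hmem' with h | h
        · exact absurd h hne
        · exact h)]
    rw [hFc]
    congr 1
    apply List.map_congr_left
    intro x hx
    have hcx : c ≤ x := le_of_lt (hc x hx)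
    rw [pvF_split es c x hcx]
    ring

-- foldl max toolkit
lemma pv_le_foldl_max : ∀ (L : List Int) (b : Int), b ≤ L.foldl max b := by
  intro L
  induction L with
  | nil => intro b; simp
  | cons x t ih => intro b; exact le_trans (le_max_left b x) (ih (max b x))

lemma pv_foldl_max_le : ∀ (L : List Int) (b c : Int), b ≤ c → (∀ x ∈ L, x ≤ c) → L.foldl max b ≤ c := by
  intro L
  induction L with
  | nil => intro b c hb _; simpa using hb
  | cons x t ih =>
    intro b c hb hall
    simp only [List.foldl_cons]
    exact ih _ _ (max_le hb (hall x List.mem_cons_self)) (fun y hy => hall y (List.mem_cons_of_mem _ hy))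

lemma pv_mem_le_foldl_max : ∀ (L : List Int) (b x : Int), x ∈ L → x ≤ L.foldl max b := by
  intro L
  induction L with
  | nil => intro b x hx; simp at hx
  | cons y t ih =>
    intro b x hx
    simp only [List.foldl_cons]
    rcases List.mem_cons.1 hx with rfl | hx
    · exact le_trans (le_max_right b x) (pv_le_foldl_max t _)
    · exact ih _ _ hx

lemma pv_exists_max : ∀ (L : List Int), L ≠ [] → ∃ q ∈ L, ∀ x ∈ L, x ≤ q := by
  intro L
  induction L with
  | nil => intro h; exact absurd rfl h
  | cons x t ih =>
    intro _
    cases t with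
    | nil => exact ⟨x, List.mem_cons_self, by intro y hy; simp at hy; omega⟩
    | cons z t' =>
      obtain ⟨q, hq, hmax⟩ := ih (by simp)
      by_cases hle : x ≤ q
      · refine ⟨q, List.mem_cons_of_mem _ hq, ?_⟩
        intro y hy
        rcases List.mem_cons.1 hy with rfl | hy
        · exact hle
        · exact hmax y hy
      · refine ⟨x, List.mem_cons_self, ?_⟩
        intro y hy
        rcases List.mem_cons.1 hy with rfl | hy
        · exact le_refl y
        · exact le_trans (hmax y hy) (by omega)

lemma pv_sum_nonpos : ∀ (L : List Int), (∀ x ∈ L, x ≤ 0) → L.sum ≤ 0 := by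
  intro L
  induction L with
  | nil => intro _; simp
  | cons x t ih =>
    intro h
    simp only [List.sum_cons]
    have h1 := h x List.mem_cons_self
    have h2 := ih (fun y hy => h y (List.mem_cons_of_mem _ hy))
    omega

-- the coverage at ANY point is bounded by the best coverage over the start coordinates:
-- every positively-weighted event sits at a coordinate of P, so between a point c and the
-- largest start q ≤ c (or below the first start) only nonpositive weight accumulates
lemma pv_stab_le : ∀ (es : List (Int × Int)) (P : List Int),
    (∀ e ∈ es, 0 < e.2 → e.1 ∈ P) → ∀ c, pvF c es ≤ (P.map (fun p => pvF p es)).foldl max 0 := by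
  intro es P hpos c
  by_cases hQ : P.filter (fun p => decide (p ≤ c)) = []
  · have hall : ∀ e ∈ es.filter (fun e => decide (e.1 ≤ c)), e.2 ≤ 0 := by
      intro e he
      have hmem := List.mem_of_mem_filter he
      have hle : e.1 ≤ c := by simpa using List.of_mem_filter he
      by_contra hgt
      have h2 : 0 < e.2 := by omega
      have hinP := hpos e hmem h2
      have : e.1 ∈ P.filter (fun p => decide (p ≤ c)) := List.mem_filter.2 ⟨hinP, by simpa using hle⟩
      rw [hQ] at this
      simp at this
    have hle0 : pvF c es ≤ 0 := by
      unfold pvF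
      apply pv_sum_nonpos
      intro x hx
      obtain ⟨e, he, rfl⟩ := List.mem_map.1 hx
      exact hall e he
    exact le_trans hle0 (pv_le_foldl_max _ _)
  · obtain ⟨q, hqQ, hqmax⟩ := pv_exists_max _ hQ
    have hqP : q ∈ P := List.mem_of_mem_filter hqQ
    have hqc : q ≤ c := by simpa using List.of_mem_filter hqQ
    have hdiff := pvF_diff es q c hqc
    have htail : ((es.filter (fun e => decide (q < e.1) && decide (e.1 ≤ c))).map (fun e => e.2)).sum ≤ 0 := by
      apply pv_sum_nonpos
      intro x hx
      obtain ⟨e, he, rfl⟩ := List.mem_map.1 hx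
      have hmem := List.mem_of_mem_filter he
      have hcond := List.of_mem_filter he
      simp only [Bool.and_eq_true, decide_eq_true_eq] at hcond
      by_contra hgt
      have h2 : 0 < e.2 := by omega
      have hinP := hpos e hmem h2
      have hinQ : e.1 ∈ P.filter (fun p => decide (p ≤ c)) :=
        List.mem_filter.2 ⟨hinP, by simpa using hcond.2⟩
      have := hqmax _ hinQ
      omega
    have hq_le : pvF q es ≤ (P.map (fun p => pvF p es)).foldl max 0 :=
      pv_mem_le_foldl_max _ _ _ (List.mem_map_of_mem hqP)
    omega

-- coverage of a weighted interval family, summed interval by interval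
lemma pv_flat_sum : ∀ (L : List (List Int)) (u p : Int),
    pvF p (L.flatMap (fun l => [(PySem.List.pyGetD l 1 0, u), (PySem.List.pyGetD l 2 0, -u)]))
      = (L.map (fun l => u * ((if PySem.List.pyGetD l 1 0 ≤ p then (1 : Int) else 0)
                              - (if PySem.List.pyGetD l 2 0 ≤ p then (1 : Int) else 0)))).sum := by
  intro L
  induction L with
  | nil => intro u p; simp [pvF]
  | cons l t ih =>
    intro u p
    simp only [List.flatMap_cons, List.map_cons, List.sum_cons]
    have happ : ∀ (xs ys : List (Int × Int)), pvF p (xs ++ ys) = pvF p xs + pvF p ys := by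
      intro xs ys; unfold pvF; simp
    rw [happ, ih]
    have hhead : pvF p [(PySem.List.pyGetD l 1 0, u), (PySem.List.pyGetD l 2 0, -u)]
        = u * ((if PySem.List.pyGetD l 1 0 ≤ p then (1 : Int) else 0)
               - (if PySem.List.pyGetD l 2 0 ≤ p then (1 : Int) else 0)) := by
      unfold pvF
      by_cases h1 : PySem.List.pyGetD l 1 0 ≤ p <;> by_cases h2 : PySem.List.pyGetD l 2 0 ≤ p <;>
        simp [List.filter_cons, h1, h2] <;> ring
    rw [hhead]

-- ===== VERDICT (by name: the statement is the Claim_ definition above) =====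
theorem max_overlap_spec : Claim_equal_max_overlap := by
  intro iv tv _ _
  unfold Spec_max_overlap max_overlap max_overlap_alt
  simp only []
  set w : Int := if tv ≠ [] then 2 * (iv.length : Int) else 0 with hw
  have hw0 : 0 ≤ w := by
    rw [hw]; split
    · positivity
    · exact le_refl 0
  have hbuild : ∀ (L : List (List Int)) (acc : List (Int × Int)) (w1 w2 : Int),
      L.foldl (fun acc l => acc ++ [(PySem.List.pyGetD l 1 0, w1)] ++ [(PySem.List.pyGetD l 2 0, w2)]) acc
      = acc ++ L.flatMap (fun l => [(PySem.List.pyGetD l 1 0, w1), (PySem.List.pyGetD l 2 0, w2)]) := by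
    intro L acc w1 w2
    rw [← PySem.List.foldl_append_eq_flatMap]
    apply PySem.List.foldl_congr_mem
    intro acc l _
    rw [List.append_assoc]
    rfl
  rw [hbuild tv [] w (-w), hbuild iv _ 1 (-1), List.nil_append]
  set E : List (Int × Int) :=
    tv.flatMap (fun l => [(PySem.List.pyGetD l 1 0, w), (PySem.List.pyGetD l 2 0, -w)])
    ++ iv.flatMap (fun l => [(PySem.List.pyGetD l 1 0, (1 : Int)), (PySem.List.pyGetD l 2 0, (-1 : Int))]) with hE
  -- A side: group the sorted sweep by coordinate, then express it as a running max of pvF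
  have hperm : (PySem.List.sorted2 E (fun e => e.1) (fun e => e.2)).Perm E :=
    PySem.List.sorted2_perm E _ _ _
  set cs : List Int := PySem.List.sorted (PySem.Set.ofList (E.map (fun e => e.1))) (fun c => c) with hcs
  have hcs_lt : cs.Pairwise (· < ·) := PySem.List.sorted_ofList_pairwise_lt _
  have hmemcs : ∀ x, x ∈ cs ↔ x ∈ E.map (fun e => e.1) := by
    intro x
    rw [hcs, PySem.List.mem_sorted, PySem.Set.mem_ofList]
  have hcovS : ∀ e ∈ PySem.List.sorted2 E (fun e => e.1) (fun e => e.2), e.1 ∈ cs := by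
    intro e he
    exact (hmemcs _).2 (List.mem_map_of_mem (hperm.mem_iff.1 he))
  have hA := pv_main cs hcs_lt _ (pv_sorted2_pairwise E) hcovS 0 0 le_rfl
  have hnet : ∀ x, pvNetAt x (PySem.List.sorted2 E (fun e => e.1) (fun e => e.2)) = pvNetAt x E := by
    intro x
    exact List.Perm.sum_eq ((hperm.filter _).map _)
  have hcong : cs.foldl (fun s x => (s.1 + pvNetAt x (PySem.List.sorted2 E (fun e => e.1) (fun e => e.2)),
        max s.2 (s.1 + pvNetAt x (PySem.List.sorted2 E (fun e => e.1) (fun e => e.2))))) ((0, 0) : Int × Int)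
      = cs.foldl (fun s x => (s.1 + pvNetAt x E, max s.2 (s.1 + pvNetAt x E))) ((0, 0) : Int × Int) := by
    apply PySem.List.foldl_congr_mem
    intro acc x _
    rw [hnet]
  have hcovE : ∀ e ∈ E, e.1 ∈ cs := by
    intro e he
    exact (hmemcs _).2 (List.mem_map_of_mem he)
  have hsweep := pv_sweep_to_max cs hcs_lt E 0 0 hcovE
  have hAmax : ((PySem.List.sorted2 E (fun e => e.1) (fun e => e.2)).foldl
      (fun s e => (s.1 + e.2, max s.2 (s.1 + e.2))) ((0, 0) : Int × Int)).2
      = (cs.map (fun x => pvF x E)).foldl max 0 := by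
    rw [hA, hcong, hsweep]
    congr 1
    apply List.map_congr_left
    intro x _
    ring
  rw [hAmax]
  -- B side: the coverage scan computes pvF, and best is the running max over start coords
  have hcov_eq : ∀ p : Int,
      iv.foldl (fun c l =>
        c + ((if PySem.List.pyGetD l 1 0 ≤ p then (1 : Int) else 0)
             - (if PySem.List.pyGetD l 2 0 ≤ p then (1 : Int) else 0)))
        (tv.foldl (fun c l =>
          c + w * ((if PySem.List.pyGetD l 1 0 ≤ p then (1 : Int) else 0)
                   - (if PySem.List.pyGetD l 2 0 ≤ p then (1 : Int) else 0))) 0)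
      = pvF p E := by
    intro p
    rw [PySem.List.foldl_add, PySem.List.foldl_add, hE]
    have happ : ∀ (xs ys : List (Int × Int)), pvF p (xs ++ ys) = pvF p xs + pvF p ys := by
      intro xs ys; unfold pvF; simp
    rw [happ, pv_flat_sum tv w p, pv_flat_sum iv 1 p]
    have hone : (iv.map (fun l => (1 : Int) * ((if PySem.List.pyGetD l 1 0 ≤ p then (1 : Int) else 0)
        - (if PySem.List.pyGetD l 2 0 ≤ p then (1 : Int) else 0))))
        = iv.map (fun l => ((if PySem.List.pyGetD l 1 0 ≤ p then (1 : Int) else 0)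
        - (if PySem.List.pyGetD l 2 0 ≤ p then (1 : Int) else 0))) := by
      apply List.map_congr_left
      intro l _
      ring
    rw [hone]
    ring
  simp only [hcov_eq]
  have hbest : (tv ++ iv).foldl (fun b l => max b (pvF (PySem.List.pyGetD l 1 0) E)) 0
      = (((tv ++ iv).map (fun l => PySem.List.pyGetD l 1 0)).map (fun p => pvF p E)).foldl max 0 := by
    rw [List.map_map, List.foldl_map]
    rfl
  rw [hbest]
  -- the two running maxima agree
  set P : List Int := (tv ++ iv).map (fun l => PySem.List.pyGetD l 1 0) with hP
  have hpos : ∀ e ∈ E, 0 < e.2 → e.1 ∈ P := by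
    intro e he hepos
    rw [hE] at he
    rcases List.mem_append.1 he with h | h
    · obtain ⟨l, hl, hel⟩ := List.mem_flatMap.1 h
      rcases List.mem_cons.1 hel with rfl | hel
      · exact List.mem_map_of_mem (List.mem_append.2 (Or.inl hl))
      · rcases List.mem_cons.1 hel with rfl | hel
        · simp only [] at hepos; omega
        · simp at hel
    · obtain ⟨l, hl, hel⟩ := List.mem_flatMap.1 h
      rcases List.mem_cons.1 hel with rfl | hel
      · exact List.mem_map_of_mem (List.mem_append.2 (Or.inr hl))
      · rcases List.mem_cons.1 hel with rfl | hel
        · simp only [] at hepos; omega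
        · simp at hel
  have hPinE : ∀ p ∈ P, p ∈ cs := by
    intro p hp
    rw [hP] at hp
    obtain ⟨l, hl, rfl⟩ := List.mem_map.1 hp
    apply (hmemcs _).2
    rw [hE]
    rcases List.mem_append.1 hl with h | h
    · exact List.mem_map.2 ⟨(PySem.List.pyGetD l 1 0, w),
        List.mem_append.2 (Or.inl (List.mem_flatMap.2 ⟨l, h, List.mem_cons_self⟩)), rfl⟩
    · exact List.mem_map.2 ⟨(PySem.List.pyGetD l 1 0, (1 : Int)),
        List.mem_append.2 (Or.inr (List.mem_flatMap.2 ⟨l, h, List.mem_cons_self⟩)), rfl⟩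
  have heq : (cs.map (fun x => pvF x E)).foldl max 0 = (P.map (fun p => pvF p E)).foldl max 0 := by
    apply le_antisymm
    · apply pv_foldl_max_le
      · exact pv_le_foldl_max _ _
      · intro y hy
        obtain ⟨x, hx, rfl⟩ := List.mem_map.1 hy
        exact pv_stab_le E P hpos x
    · apply pv_foldl_max_le
      · exact pv_le_foldl_max _ _
      · intro y hy
        obtain ⟨p, hp, rfl⟩ := List.mem_map.1 hy
        exact pv_mem_le_foldl_max _ _ _ (List.mem_map_of_mem (hPinE p hp))
  rw [heq]
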